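-- pv_equiv track=rewrite | github.com/ispras/dedoc | labeling/train_dataset/taskers/concrete_taskers/line_label_tasker.py | _task_batch
-- ===== SOURCE A (Python) =====
-- from typing import Callable, Iterable, List
--
-- def _task_batch(pages: Iterable[List[dict]], size: int) -> Iterable[List[List[dict]]]:
--     task = []
--     current_size = 0
--     for page in pages:
--         new_page = []
--         for item in page:
--             new_page.append(item)
--             current_size += 1
--             if current_size >= size:
--                 task.append(new_page)
--                 yield task
--                 new_page = []
--                 task = []
--                 current_size = 0
--         if len(new_page) > 0:
--             task.append(new_page)
--     if len(task) > 0: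
--         yield task
-- ===== SOURCE B (Python) =====
-- from itertools import groupby
-- from typing import Iterable, List
--
--
-- def _task_batch(pages: Iterable[List[dict]], size: int) -> Iterable[List[List[dict]]]:
--     buffer = []  # flat stream of (page_index, item) pairs since the last emitted task
--     for page_index, page in enumerate(pages):
--         for item in page:
--             buffer.append((page_index, item))
--             if len(buffer) >= size:
--                 yield [[it for _, it in grp] for _, grp in groupby(buffer, key=lambda p: p[0])]
--                 buffer = []
--     if buffer:
--         yield [[it for _, it in grp] for _, grp in groupby(buffer, key=lambda p: p[0])]
-- ===== Notes on version B (the rewrite author's own statement) =====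
-- stated objective: alternative
-- what changed: B replaces A's nested page/item accumulators (task, new_page, current_size) by a single flat buffer of (page_index, item) pairs built with enumerate, emitting a task by regrouping the buffer into pages with itertools.groupby whenever the buffer reaches size.
import Mathlib
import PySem

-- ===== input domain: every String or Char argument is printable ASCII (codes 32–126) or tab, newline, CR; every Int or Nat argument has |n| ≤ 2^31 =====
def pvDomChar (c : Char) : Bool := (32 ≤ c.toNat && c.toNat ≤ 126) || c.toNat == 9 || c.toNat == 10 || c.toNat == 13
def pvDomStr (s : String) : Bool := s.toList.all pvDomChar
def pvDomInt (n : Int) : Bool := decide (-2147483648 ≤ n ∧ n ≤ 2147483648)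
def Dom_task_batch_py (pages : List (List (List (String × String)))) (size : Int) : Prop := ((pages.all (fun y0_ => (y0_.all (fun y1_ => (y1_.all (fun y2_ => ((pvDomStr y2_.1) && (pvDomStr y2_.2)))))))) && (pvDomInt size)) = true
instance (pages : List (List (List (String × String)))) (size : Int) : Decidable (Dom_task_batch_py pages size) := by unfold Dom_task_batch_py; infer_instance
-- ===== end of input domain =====

-- B replaces A's nested page/item accumulators by a single flat buffer of
-- (page_index, item) pairs, regrouped into pages with a consecutive groupby at each emit
-- (alternative decomposition, same cost). Both are generators in Python; the ports return
-- the list of yielded tasks.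

-- ===== PORT A =====
-- inner loop body: state = (yielded tasks, task, new_page, current_size)
def aInner (size : Int)
    (st : List (List (List (List (String × String)))) × List (List (List (String × String))) × List (List (String × String)) × Int)
    (item : List (String × String)) :
    List (List (List (List (String × String)))) × List (List (List (String × String))) × List (List (String × String)) × Int :=
  let np := st.2.2.1 ++ [item]
  let cur := st.2.2.2 + 1
  if cur ≥ size then (st.1 ++ [st.2.1 ++ [np]], [], [], 0)
  else (st.1, st.2.1, np, cur)

-- per-page body: state = (yielded tasks, task, current_size); new_page starts empty
def aOuter (size : Int)
    (st : List (List (List (List (String × String)))) × List (List (List (String × String))) × Int)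
    (page : List (List (String × String))) :
    List (List (List (List (String × String)))) × List (List (List (String × String))) × Int :=
  let r := page.foldl (aInner size) (st.1, st.2.1, [], st.2.2)
  if r.2.2.1.length > 0 then (r.1, r.2.1 ++ [r.2.2.1], r.2.2.2)
  else (r.1, r.2.1, r.2.2.2)

def task_batch_py (pages : List (List (List (String × String)))) (size : Int) :
    List (List (List (List (String × String)))) :=
  let st := pages.foldl (aOuter size) ([], [], 0)
  if st.2.1.length > 0 then st.1 ++ [st.2.1] else st.1

-- ===== PORT B =====
-- itertools.groupby on the page index, keeping each group's items (consecutive grouping)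
def gp : List (Int × List (String × String)) → List (List (List (String × String)))
  | [] => []
  | [p] => [[p.2]]
  | p :: q :: rest =>
    match gp (q :: rest) with
    | [] => [[p.2]]
    | g :: gs => if p.1 = q.1 then (p.2 :: g) :: gs else [p.2] :: g :: gs

-- fold body over the flat (page_index, item) stream: state = (yielded tasks, buffer)
def bStep (size : Int)
    (st : List (List (List (List (String × String)))) × List (Int × List (String × String)))
    (p : Int × List (String × String)) :
    List (List (List (List (String × String)))) × List (Int × List (String × String)) :=
  let buf := st.2 ++ [p]
  if (buf.length : Int) ≥ size then (st.1 ++ [gp buf], []) else (st.1, buf)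

def task_batch_py_alt (pages : List (List (List (String × String)))) (size : Int) :
    List (List (List (List (String × String)))) :=
  let pairs := (PySem.List.enumerate pages).flatMap (fun q => q.2.map (fun it => (q.1, it)))
  let st := pairs.foldl (bStep size) ([], [])
  if st.2 ≠ [] then st.1 ++ [gp st.2] else st.1

-- ===== PRECONDITION & SPEC =====
def Spec_task_batch_py (pages : List (List (List (String × String)))) (size : Int) (out : List (List (List (List (String × String))))) : Prop := out = task_batch_py_alt pages size
instance (pages : List (List (List (String × String)))) (size : Int) (out : List (List (List (List (String × String))))) : Decidable (Spec_task_batch_py pages size out) := by unfold Spec_task_batch_py; infer_instance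

-- ===== CLAIM (what is proved, stated in full; the proofs are below) =====
def Claim_equal_task_batch_py : Prop := ∀ (pages : List (List (List (String × String)))) (size : Int), Dom_task_batch_py pages size → Spec_task_batch_py pages size (task_batch_py pages size)

-- ===== LEMMAS AND PROOFS =====

-- every group produced by gp from a cons starts with that cons's item
theorem gp_cons (p : Int × List (String × String)) (l : List (Int × List (String × String))) :
    ∃ g gs, gp (p :: l) = (p.2 :: g) :: gs := by
  induction l generalizing p with
  | nil => exact ⟨[], [], rfl⟩
  | cons q t ih =>
    obtain ⟨g, gs, hg⟩ := ih q
    refine ⟨?_, ?_, ?_⟩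
    · exact if p.1 = q.1 then q.2 :: g else []
    · exact if p.1 = q.1 then gs else (q.2 :: g) :: gs
    · rw [gp, hg]
      split_ifs with h <;> simp

theorem gp_nil_iff (l : List (Int × List (String × String))) : gp l = [] ↔ l = [] := by
  cases l with
  | nil => simp [gp]
  | cons p t =>
    obtain ⟨g, gs, hg⟩ := gp_cons p t
    simp [hg]

-- a constant-key block is one group
theorem gp_const (i : Int) (np : List (List (String × String))) (h : np ≠ []) :
    gp (np.map (fun v => (i, v))) = [np] := by
  induction np with
  | nil => exact absurd rfl h
  | cons v t ih =>
    cases t with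
    | nil => rfl
    | cons v' t' =>
      simp only [List.map_cons] at ih ⊢
      rw [gp, ih (by simp)]
      simp

-- gp distributes over a split at a strictly larger key
theorem gp_append (xs : List (Int × List (String × String))) (i : Int)
    (v : List (String × String)) (rest : List (Int × List (String × String)))
    (hlt : ∀ p ∈ xs, p.1 < i) :
    gp (xs ++ (i, v) :: rest) = gp xs ++ gp ((i, v) :: rest) := by
  induction xs with
  | nil => simp [gp]
  | cons q t ih =>
    have hq : q.1 < i := hlt q (by simp)
    cases t with
    | nil =>
      obtain ⟨g, gs, hg⟩ := gp_cons (i, v) rest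
      show gp (q :: (i, v) :: rest) = gp [q] ++ gp ((i, v) :: rest)
      conv_lhs => rw [gp]
      rw [hg]
      simp [gp, Int.ne_of_lt hq]
    | cons q' t' =>
      have ih' := ih (fun p hp => hlt p (by simp [hp]))
      simp only [List.cons_append] at ih' ⊢
      conv_lhs => rw [gp]
      rw [ih']
      conv_rhs => rw [gp]
      obtain ⟨g, gs, hg⟩ := gp_cons q' t'
      rw [hg]
      split_ifs <;> simp

-- a block below key i followed by a constant-i block groups as gp of the first ++ one group
theorem gp_split (bufT : List (Int × List (String × String))) (i : Int)
    (np : List (List (String × String)))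
    (hlt : ∀ p ∈ bufT, p.1 < i) (hnp : np ≠ []) :
    gp (bufT ++ np.map (fun v => (i, v))) = gp bufT ++ [np] := by
  have h1 : np.map (fun v => (i, v)) = (i, np.head hnp) :: np.tail.map (fun v => (i, v)) := by
    cases np with
    | nil => exact absurd rfl hnp
    | cons a t => simp
  rw [h1, gp_append bufT i _ _ hlt, ← h1, gp_const i np hnp]

-- one page: A's inner item loop matches B's fold over the page's tagged items
theorem inner_eq (items : List (List (String × String))) (size i : Int)
    (out : List (List (List (List (String × String)))))
    (task : List (List (List (String × String))))
    (np : List (List (String × String)))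
    (bufT : List (Int × List (String × String)))
    (hlt : ∀ p ∈ bufT, p.1 < i) (htask : gp bufT = task) :
    let buf0 := bufT ++ np.map (fun v => (i, v))
    let A := items.foldl (aInner size) (out, task, np, (buf0.length : Int))
    let B := (items.map (fun it => (i, it))).foldl (bStep size) (out, buf0)
    ∃ np' bufT', A = (B.1, gp bufT', np', (B.2.length : Int)) ∧
      B.2 = bufT' ++ np'.map (fun v => (i, v)) ∧ (∀ p ∈ bufT', p.1 < i) := by
  induction items generalizing out task np bufT with
  | nil => exact ⟨np, bufT, by simp [htask], rfl, hlt⟩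
  | cons it rest ih =>
    simp only [List.map_cons, List.foldl_cons]
    have hbuf : (bufT ++ np.map (fun v => (i, v))) ++ [(i, it)]
        = bufT ++ (np ++ [it]).map (fun v => (i, v)) := by simp
    by_cases hc : ((bufT ++ np.map (fun v => (i, v))).length : Int) + 1 ≥ size
    · have hstepA : aInner size (out, task, np, ((bufT ++ np.map (fun v => (i, v))).length : Int)) it
          = (out ++ [task ++ [np ++ [it]]], [], [], 0) := by
        simp only [aInner]
        rw [if_pos (by omega)]
      have hstepB : bStep size (out, bufT ++ np.map (fun v => (i, v))) (i, it)
          = (out ++ [task ++ [np ++ [it]]], []) := by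
        simp only [bStep]
        rw [if_pos (by simpa using hc), hbuf, gp_split bufT i (np ++ [it]) hlt (by simp), htask]
      rw [hstepA, hstepB]
      have := ih (out ++ [task ++ [np ++ [it]]]) [] [] [] (by simp) rfl
      simpa using this
    · have hstepA : aInner size (out, task, np, ((bufT ++ np.map (fun v => (i, v))).length : Int)) it
          = (out, task, np ++ [it], ((bufT ++ np.map (fun v => (i, v))).length : Int) + 1) := by
        simp only [aInner]
        rw [if_neg (by omega)]
      have hstepB : bStep size (out, bufT ++ np.map (fun v => (i, v))) (i, it)
          = (out, bufT ++ (np ++ [it]).map (fun v => (i, v))) := by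
        simp only [bStep]
        rw [if_neg (by simpa using hc), hbuf]
      rw [hstepA, hstepB]
      have hlen : ((bufT ++ np.map (fun v => (i, v))).length : Int) + 1
          = ((bufT ++ (np ++ [it]).map (fun v => (i, v))).length : Int) := by
        simp; ring
      rw [hlen]
      exact ih out task (np ++ [it]) bufT hlt htask

-- whole input: A's page loop matches B's fold over the flattened enumerated stream
theorem outer_eq (pages : List (List (List (String × String)))) (size : Int) (i : Int)
    (out : List (List (List (List (String × String)))))
    (bufT : List (Int × List (String × String)))
    (hlt : ∀ p ∈ bufT, p.1 < i) :
    let A := pages.foldl (aOuter size) (out, gp bufT, (bufT.length : Int))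
    let B := ((PySem.List.enumerate pages i).flatMap (fun q => q.2.map (fun it => (q.1, it)))).foldl (bStep size) (out, bufT)
    A = (B.1, gp B.2, (B.2.length : Int)) ∧ (∀ p ∈ B.2, p.1 < i + pages.length) := by
  induction pages generalizing i out bufT with
  | nil => exact ⟨rfl, by simpa using hlt⟩
  | cons page rest ih =>
    simp only [PySem.List.enumerate_cons, List.flatMap_cons, List.foldl_append, List.foldl_cons]
    obtain ⟨np', bufT', hA, hB2, hlt'⟩ := inner_eq page size i out (gp bufT) [] bufT hlt rfl
    simp only [List.map_nil, List.append_nil] at hA hB2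
    set B1 := (page.map (fun it => (i, it))).foldl (bStep size) (out, bufT) with hB1
    have hltB1 : ∀ p ∈ B1.2, p.1 < i + 1 := by
      intro p hp
      rw [hB2] at hp
      rcases List.mem_append.mp hp with h | h
      · exact lt_trans (hlt' p h) (by omega)
      · obtain ⟨v, -, rfl⟩ := List.mem_map.mp h
        show i < i + 1
        omega
    have houter : aOuter size (out, gp bufT, (bufT.length : Int)) page
        = (B1.1, gp B1.2, (B1.2.length : Int)) := by
      simp only [aOuter, hA]
      by_cases hnp : np' = []
      · subst hnp
        simp only [List.map_nil, List.append_nil] at hB2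
        simp [hB2]
      · rw [if_pos (by simpa using List.length_pos_of_ne_nil hnp), hB2,
          gp_split bufT' i np' hlt' hnp]
    rw [houter]
    obtain ⟨h1, h2⟩ := ih (i + 1) B1.1 B1.2 hltB1
    refine ⟨h1, fun p hp => ?_⟩
    have := h2 p hp
    simp only [List.length_cons]
    omega

-- ===== VERDICT (by name: the statement is the Claim_ definition above) =====
theorem task_batch_py_spec : Claim_equal_task_batch_py := by
  intro pages size _
  show task_batch_py pages size = task_batch_py_alt pages size
  obtain ⟨h1, _⟩ := outer_eq pages size 0 [] [] (by simp)
  simp only [task_batch_py, task_batch_py_alt]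
  rw [show (([], [], 0) : List (List (List (List (String × String)))) × List (List (List (String × String))) × Int) = ([], gp [], ((([] : List (Int × List (String × String))).length : Int))) from rfl]
  rw [h1]
  set B := ((PySem.List.enumerate pages 0).flatMap (fun q => q.2.map (fun it => (q.1, it)))).foldl (bStep size) ([], ([] : List (Int × List (String × String))))
  by_cases hb : B.2 = []
  · simp [hb, gp]
  · have : gp B.2 ≠ [] := fun h => hb ((gp_nil_iff B.2).mp h)
    rw [if_pos (by simpa using List.length_pos_of_ne_nil this), if_pos hb]
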